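-- pv_equiv track=rewrite | github.com/Barak-Lavi/Final-Project | SSP_MAS_KAMIN-master/Data Generator.py | create_room_ward_dict
-- ===== SOURCE A (Python) =====
-- def create_room_ward_dict(r_st_dict, w_st_dict):
--     """
--     :param r_st_dict: dictionary {r_id : (st_1..st_n), r2 : (st1..stn)...} the values of the keys are of set kind
--     :param w_st_dict: dictionary {w_id : (st_1, st_2...), w2: (st1..stn)...} each value of the different
--     dict keys is a set
--     :return: dictionary {r_id: [w1, w2..wn], r2: [w2,w4..wn]...}
--     """
--     rw_dict = {}
--     for r in r_st_dict:
--         rw_dict[r] = []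
--         for w in w_st_dict:
--             if len(r_st_dict[r].intersection(w_st_dict[w])):
--                 rw_dict[r].append(w)
--     return rw_dict
-- ===== SOURCE B (Python) =====
-- def create_room_ward_dict(r_st_dict, w_st_dict):
--     # Inverted index: surgery type -> set of wards offering it; each room then
--     # unions the postings of its types and emits matches in ward order.
--     index = {}
--     for w, sts in w_st_dict.items():
--         for st in sts:
--             index.setdefault(st, set()).add(w)
--     rw_dict = {}
--     for r, sts in r_st_dict.items():
--         matched = set()
--         for st in sts:
--             matched.update(index.get(st, ()))
--         rw_dict[r] = [w for w in w_st_dict if w in matched]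
--     return rw_dict
-- ===== Notes on version B (the rewrite author's own statement) =====
-- stated objective: faster
-- what changed: Replaces A's triple loop (every room x every ward x set intersection) by an inverted index surgery-type -> set of wards built once; each room unions the postings of its own types and emits the matched wards in ward order.
import Mathlib
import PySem

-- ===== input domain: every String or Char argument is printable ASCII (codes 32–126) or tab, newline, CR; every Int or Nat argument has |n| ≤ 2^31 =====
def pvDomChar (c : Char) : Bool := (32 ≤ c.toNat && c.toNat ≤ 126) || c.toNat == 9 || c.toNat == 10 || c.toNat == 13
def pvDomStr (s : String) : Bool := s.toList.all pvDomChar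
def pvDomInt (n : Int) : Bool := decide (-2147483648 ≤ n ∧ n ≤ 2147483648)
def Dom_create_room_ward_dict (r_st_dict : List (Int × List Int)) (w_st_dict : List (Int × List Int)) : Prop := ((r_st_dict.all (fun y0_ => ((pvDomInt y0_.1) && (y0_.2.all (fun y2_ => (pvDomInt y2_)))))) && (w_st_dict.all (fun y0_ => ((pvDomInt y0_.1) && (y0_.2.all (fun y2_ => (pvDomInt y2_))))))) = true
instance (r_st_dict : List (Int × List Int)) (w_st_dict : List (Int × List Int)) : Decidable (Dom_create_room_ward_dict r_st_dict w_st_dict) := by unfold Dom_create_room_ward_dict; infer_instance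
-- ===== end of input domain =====

-- B replaces A's per-room scan over every ward's whole surgery set by an inverted index
-- (surgery type -> set of wards) built once; objective: faster (per-room work no longer
-- touches every surgery set).

-- ===== PORT A =====
-- A: for each room, for each ward, test the set intersection of their surgery types;
-- rows are kept inside the result dict (rw_dict[r] = []; rw_dict[r].append(w)).
def create_room_ward_dict (r_st_dict : List (Int × List Int)) (w_st_dict : List (Int × List Int)) : List (Int × List Int) :=
  (r_st_dict.foldl (fun rw p =>
      w_st_dict.foldl (fun rw2 q =>
        if PySem.Set.len (PySem.Set.inter ((PySem.Dict.mk r_st_dict).getD p.1 [])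
            ((PySem.Dict.mk w_st_dict).getD q.1 [])) ≠ 0
        then rw2.modify p.1 [] (fun row => row ++ [q.1]) else rw2)
      (rw.insert p.1 []))
    PySem.Dict.empty).items

-- ===== PORT B =====
-- index = {}; for w, sts in w_st_dict.items(): for st in sts: index.setdefault(st, set()).add(w)
def pvIndex (w_st_dict : List (Int × List Int)) : PySem.Dict Int (List Int) :=
  w_st_dict.foldl (fun ix q =>
    q.2.foldl (fun ix2 st => ix2.insert st (PySem.Set.add (ix2.getD st []) q.1)) ix)
  PySem.Dict.empty

def create_room_ward_dict_alt (r_st_dict : List (Int × List Int)) (w_st_dict : List (Int × List Int)) : List (Int × List Int) :=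
  let index := pvIndex w_st_dict
  (r_st_dict.foldl (fun rw p =>
      let matched := p.2.foldl (fun m st => PySem.Set.union m (index.getD st [])) PySem.Set.empty
      rw.insert p.1 ((w_st_dict.filter (fun q => PySem.Set.contains matched q.1)).map (fun q => q.1)))
    PySem.Dict.empty).items

-- ===== PRECONDITION & SPEC =====
-- Pre_ requires the keys of each association list to be distinct: a Python dict cannot
-- contain duplicate keys, so a list with duplicate keys represents no Python input at all.
def Pre_create_room_ward_dict (r_st_dict : List (Int × List Int)) (w_st_dict : List (Int × List Int)) : Prop :=
  (r_st_dict.map Prod.fst).Nodup ∧ (w_st_dict.map Prod.fst).Nodup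
instance (r_st_dict : List (Int × List Int)) (w_st_dict : List (Int × List Int)) : Decidable (Pre_create_room_ward_dict r_st_dict w_st_dict) := by unfold Pre_create_room_ward_dict; infer_instance
def pvWitness_create_room_ward_dict : (List (Int × List Int)) × (List (Int × List Int)) :=
  ([(1, [2, 3]), (2, [4])], [(7, [3]), (8, [5])])
def Spec_create_room_ward_dict (r_st_dict : List (Int × List Int)) (w_st_dict : List (Int × List Int)) (out : List (Int × List Int)) : Prop := out = create_room_ward_dict_alt r_st_dict w_st_dict
instance (r_st_dict : List (Int × List Int)) (w_st_dict : List (Int × List Int)) (out : List (Int × List Int)) : Decidable (Spec_create_room_ward_dict r_st_dict w_st_dict out) := by unfold Spec_create_room_ward_dict; infer_instance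

-- ===== CLAIM (what is proved, stated in full; the proofs are below) =====
def Claim_equal_create_room_ward_dict : Prop := ∀ (r_st_dict : List (Int × List Int)) (w_st_dict : List (Int × List Int)), Dom_create_room_ward_dict r_st_dict w_st_dict → Pre_create_room_ward_dict r_st_dict w_st_dict → Spec_create_room_ward_dict r_st_dict w_st_dict (create_room_ward_dict r_st_dict w_st_dict)

-- ===== LEMMAS AND PROOFS =====

theorem pv_insert_insert_self (d : PySem.Dict Int (List Int)) (k : Int) (v v' : List Int) :
    (d.insert k v).insert k v' = d.insert k v' := by
  apply PySem.Dict.ext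
  by_cases h : d.contains k = true
  · simp [PySem.Dict.items_insert, h, PySem.Dict.contains_insert_self, List.map_map]
    intro a b hab
    by_cases hak : a = k <;> simp [hak]
  · simp [PySem.Dict.items_insert, h, PySem.Dict.contains_insert_self]
    conv_rhs => rw [(List.map_id d.items).symm]
    apply List.map_congr_left; intro p hp
    have hk : p.1 ≠ k := by
      intro he
      exact h ((PySem.Dict.contains_iff_mem_keys d k).mpr (he ▸ PySem.Dict.mem_keys_of_mem_items d hp))
    simp [hk]

theorem pv_modify_insert (d : PySem.Dict Int (List Int)) (k : Int) (v : List Int)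
    (f : List Int → List Int) : (d.insert k v).modify k [] f = d.insert k (f v) := by
  show (d.insert k v).insert k (f ((d.insert k v).getD k [])) = _
  rw [PySem.Dict.getD_insert_self, pv_insert_insert_self]

-- A's inner ward loop, run on a row freshly installed under key k, installs the filtered row.
theorem pv_innerA (l : List (Int × List Int)) (c : (Int × List Int) → Prop) [DecidablePred c]
    (d : PySem.Dict Int (List Int)) (k : Int) (acc : List Int) :
    l.foldl (fun rw2 q => if c q then rw2.modify k [] (fun row => row ++ [q.1]) else rw2)
      (d.insert k acc)
    = d.insert k (acc ++ (l.filter (fun q => decide (c q))).map (fun q => q.1)) := by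
  induction l generalizing acc with
  | nil => simp
  | cons q t ih =>
    by_cases hq : c q
    · simp only [List.foldl_cons, if_pos hq, pv_modify_insert, ih, List.filter_cons,
        decide_eq_true hq]
      simp
    · simp only [List.foldl_cons, if_neg hq, ih, List.filter_cons]
      simp [hq]

-- membership in index[st] after one ward's surgery list is folded in
theorem pv_index_inner (l : List Int) (a : Int) (d : PySem.Dict Int (List Int)) (st wk : Int) :
    wk ∈ (l.foldl (fun ix2 st' => ix2.insert st' (PySem.Set.add (ix2.getD st' []) a)) d).getD st []
      ↔ wk ∈ d.getD st [] ∨ (wk = a ∧ st ∈ l) := by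
  induction l generalizing d with
  | nil => simp
  | cons s t ih =>
    simp only [List.foldl_cons, ih, PySem.Dict.getD_insert]
    by_cases hs : st = s
    · subst hs
      simp [PySem.Set.mem_add]
      tauto
    · simp [hs]

-- membership in the full inverted index
theorem pv_index_mem (W : List (Int × List Int)) (st wk : Int) :
    wk ∈ (pvIndex W).getD st [] ↔ ∃ q ∈ W, q.1 = wk ∧ st ∈ q.2 := by
  unfold pvIndex
  suffices h : ∀ (d : PySem.Dict Int (List Int)),
      wk ∈ (W.foldl (fun ix q =>
          q.2.foldl (fun ix2 st' => ix2.insert st' (PySem.Set.add (ix2.getD st' []) q.1)) ix) d).getD st []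
        ↔ wk ∈ d.getD st [] ∨ ∃ q ∈ W, q.1 = wk ∧ st ∈ q.2 by
    simpa using h PySem.Dict.empty
  induction W with
  | nil => simp
  | cons q t ih =>
    intro d
    simp only [List.foldl_cons, ih, pv_index_inner]
    constructor
    · rintro (⟨h | ⟨rfl, hst⟩⟩ | h)
      · exact Or.inl h
      · exact Or.inr ⟨q, by simp, rfl, hst⟩
      · obtain ⟨q', hq', h1, h2⟩ := h
        exact Or.inr ⟨q', by simp [hq'], h1, h2⟩
    · rintro (h | ⟨q', hq', h1, h2⟩)
      · exact Or.inl (Or.inl h)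
      · rcases List.mem_cons.mp hq' with rfl | hmem
        · exact Or.inl (Or.inr ⟨h1.symm, h2⟩)
        · exact Or.inr ⟨q', hmem, h1, h2⟩

-- membership in the union of postings lists
theorem pv_matched_mem (l : List Int) (ix : PySem.Dict Int (List Int))
    (m0 : List Int) (wk : Int) :
    wk ∈ l.foldl (fun m st => PySem.Set.union m (ix.getD st [])) m0
      ↔ wk ∈ m0 ∨ ∃ st ∈ l, wk ∈ ix.getD st [] := by
  induction l generalizing m0 with
  | nil => simp
  | cons s t ih =>
    simp only [List.foldl_cons, ih, PySem.Set.mem_union]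
    constructor
    · rintro (⟨h | h⟩ | ⟨st, hst, h⟩)
      · exact Or.inl h
      · exact Or.inr ⟨s, by simp, h⟩
      · exact Or.inr ⟨st, by simp [hst], h⟩
    · rintro (h | ⟨st, hst, h⟩)
      · exact Or.inl (Or.inl h)
      · rcases List.mem_cons.mp hst with rfl | hmem
        · exact Or.inl (Or.inr h)
        · exact Or.inr ⟨st, hmem, h⟩

-- distinct keys make the pair determined by its key
theorem pv_key_inj (W : List (Int × List Int)) (h : (W.map Prod.fst).Nodup)
    {q q' : Int × List Int} (hq : q ∈ W) (hq' : q' ∈ W) (he : q'.1 = q.1) : q' = q := by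
  induction W with
  | nil => simp at hq
  | cons a t ih =>
    simp only [List.map_cons, List.nodup_cons] at h
    rcases List.mem_cons.mp hq with rfl | hqt <;> rcases List.mem_cons.mp hq' with rfl | hq't
    · rfl
    · exact absurd (he ▸ List.mem_map_of_mem hq't) h.1
    · exact absurd (he ▸ List.mem_map_of_mem hqt : q'.1 ∈ t.map Prod.fst) (he.symm ▸ h.1)
    · exact ih h.2 hqt hq't

-- Python's 'len(a.intersection(b))' truthiness is joint membership
theorem pv_inter_len (a b : List Int) :
    PySem.Set.len (PySem.Set.inter a b) ≠ 0 ↔ ∃ x ∈ a, x ∈ b := by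
  have h : PySem.Set.len (PySem.Set.inter a b) ≠ 0 ↔ PySem.Set.inter a b ≠ [] := by
    simp [PySem.Set.len]
  rw [h, ← List.isEmpty_eq_false_iff, List.isEmpty_eq_false_iff_exists_mem]
  constructor
  · rintro ⟨x, hx⟩
    have := (PySem.Set.mem_inter a b x).mp hx
    exact ⟨x, this.1, this.2⟩
  · rintro ⟨x, h1, h2⟩
    exact ⟨x, (PySem.Set.mem_inter a b x).mpr ⟨h1, h2⟩⟩

-- getD on an assoc list with distinct keys returns the pair's own value
theorem pv_getD_self (W : List (Int × List Int)) (h : (W.map Prod.fst).Nodup)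
    {q : Int × List Int} (hq : q ∈ W) : (PySem.Dict.mk W).getD q.1 [] = q.2 := by
  have : (q.1, q.2) ∈ (PySem.Dict.mk W).items := by simpa using hq
  exact PySem.Dict.getD_of_mem_items _ this (by simpa [PySem.Dict.keys] using h) []

-- ===== VERDICT (by name: the statement is the Claim_ definition above) =====
theorem create_room_ward_dict_spec : Claim_equal_create_room_ward_dict := by
  intro R W _ hpre
  unfold Spec_create_room_ward_dict create_room_ward_dict create_room_ward_dict_alt
  obtain ⟨hr, hw⟩ := hpre
  congr 1
  apply PySem.List.foldl_congr_mem
  intro acc p hp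
  rw [pv_innerA]
  congr 1
  rw [List.nil_append]
  congr 1
  apply List.filter_congr
  intro q hq
  rw [pv_getD_self R hr hp, pv_getD_self W hw hq, Bool.eq_iff_iff, decide_eq_true_iff]
  rw [pv_inter_len]
  constructor
  · rintro ⟨st, hst, hstq⟩
    rw [PySem.Set.contains_iff, pv_matched_mem]
    exact Or.inr ⟨st, hst, (pv_index_mem W st q.1).mpr ⟨q, hq, rfl, hstq⟩⟩
  · intro hc
    rw [PySem.Set.contains_iff, pv_matched_mem] at hc
    rcases hc with h0 | ⟨st, hst, hmem⟩
    · simp [PySem.Set.empty] at h0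
    · obtain ⟨q', hq', he, hstq'⟩ := (pv_index_mem W st q.1).mp hmem
      exact ⟨st, hst, (pv_key_inj W hw hq hq' he) ▸ hstq'⟩
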